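-- pv_equiv track=rewrite | github.com/daniel-bss/UraiRajut | UraiRajut.py | urai
-- ===== SOURCE A (Python) =====
-- def urai(kata):
--     x = list()
--     for i in range(len(kata)):
--         for j in range(i+1):
--             x.append(kata[j])
--
--     a = ''
--     for i in x:
--         a += i
--     return a
-- ===== SOURCE B (Python) =====
-- def urai(kata):
--     prefix = ''
--     parts = []
--     for ch in kata:
--         prefix += ch
--         parts.append(prefix)
--     return ''.join(parts)
-- ===== Notes on version B (the rewrite author's own statement) =====
-- stated objective: faster
-- what changed: Single pass that maintains the growing prefix as accumulated state and joins the emitted prefixes once, instead of nested index loops that re-scan from 0 plus a quadratic character-by-character string += concatenation.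
import Mathlib
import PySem

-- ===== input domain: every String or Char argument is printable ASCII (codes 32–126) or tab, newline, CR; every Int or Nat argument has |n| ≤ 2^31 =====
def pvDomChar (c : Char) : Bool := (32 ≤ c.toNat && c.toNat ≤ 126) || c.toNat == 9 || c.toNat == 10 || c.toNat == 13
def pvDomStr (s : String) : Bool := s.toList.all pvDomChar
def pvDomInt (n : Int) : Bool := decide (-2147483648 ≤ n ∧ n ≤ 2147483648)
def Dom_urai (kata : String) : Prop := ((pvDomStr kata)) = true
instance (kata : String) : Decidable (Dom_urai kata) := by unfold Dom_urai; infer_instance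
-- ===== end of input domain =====

-- B concatenates the prefixes in one pass over the string (maintaining the growing
-- prefix as state) instead of A's nested index loops plus a char-by-char += loop.

-- ===== PORT A =====
-- x = []; for i in range(len(kata)): for j in range(i+1): x.append(kata[j])
-- kata[j] is always in range here (0 ≤ j ≤ i < len), so pyGet? never yields none;
-- .getD ' ' only strips the Option and its default is never the value used.
def urai (kata : String) : String :=
  let x : List Char :=
    (PySem.List.pyRange 0 (PySem.Str.len kata) 1).foldl (fun x i =>
      (PySem.List.pyRange 0 (i + 1) 1).foldl (fun x j =>
        x ++ [(PySem.Str.pyGet? kata j).getD ' ']) x) []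
  -- a = ''; for i in x: a += i
  String.ofList (x.foldl (fun a c => a ++ [c]) [])

-- ===== PORT B =====
-- prefix = ''; parts = []; for ch in kata: prefix += ch; parts.append(prefix); return ''.join(parts)
def urai_alt (kata : String) : String :=
  let st := kata.toList.foldl
    (fun (st : List Char × List (List Char)) ch =>
      let pre := st.1 ++ [ch]
      (pre, st.2 ++ [pre])) ([], [])
  String.ofList st.2.flatten

-- ===== PRECONDITION & SPEC =====
def Spec_urai (kata : String) (out : String) : Prop := out = urai_alt kata
instance (kata : String) (out : String) : Decidable (Spec_urai kata out) := by unfold Spec_urai; infer_instance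

-- ===== CLAIM (what is proved, stated in full; the proofs are below) =====
def Claim_equal_urai : Prop := ∀ (kata : String), Dom_urai kata → Spec_urai kata (urai kata)

-- ===== LEMMAS AND PROOFS =====

-- mapping the defaulted getter over range m is a take
lemma map_range_getD_eq_take (l : List Char) (m : Nat) (h : m ≤ l.length) :
    (List.range m).map (fun j => l[j]?.getD ' ') = l.take m := by
  induction m with
  | zero => simp
  | succ m ih =>
    have hm : m < l.length := by omega
    rw [List.range_succ, List.map_append, ih (by omega), List.take_add_one]
    simp [List.getElem?_eq_getElem hm]

-- A's inner loop appends the getter over range (i+1)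
lemma uraiA_inner (kata : String) (i : Int) (x : List Char) :
    (PySem.List.pyRange 0 (i + 1) 1).foldl (fun x j =>
      x ++ [(PySem.Str.pyGet? kata j).getD ' ']) x
    = x ++ (List.range (i + 1).toNat).map (fun k => (kata.toList[k]?).getD ' ') := by
  rw [PySem.List.pyRange_one, List.foldl_map,
      PySem.List.foldl_append_singleton_eq_map]
  simp

-- A's nested loops build the concatenation of all prefixes
lemma uraiA_x (kata : String) :
    (PySem.List.pyRange 0 (PySem.Str.len kata) 1).foldl (fun x i =>
      (PySem.List.pyRange 0 (i + 1) 1).foldl (fun x j =>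
        x ++ [(PySem.Str.pyGet? kata j).getD ' ']) x) []
    = ((List.range kata.toList.length).map (fun i => kata.toList.take (i + 1))).flatten := by
  rw [PySem.List.foldl_congr_mem _ _
        (fun x i => x ++ (List.range (i + 1).toNat).map (fun k => (kata.toList[k]?).getD ' '))
        []
        (fun acc i _ => uraiA_inner kata i acc),
      PySem.List.foldl_append_eq_flatMap]
  rw [PySem.List.pyRange_one]
  simp only [sub_zero, List.flatMap_map, zero_add, List.nil_append, PySem.Str.len_eq]
  rw [List.flatMap_def]
  congr 1
  refine List.map_congr_left (fun k hk => ?_)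
  rw [List.mem_range] at hk
  have : ((k : Int) + 1).toNat = k + 1 := by omega
  rw [this, map_range_getD_eq_take _ _ (by omega)]

-- A's final += loop is the identity on the char list
lemma foldl_push_id (x : List Char) : x.foldl (fun a c => a ++ [c]) ([] : List Char) = x := by
  have := PySem.List.foldl_append_singleton_eq_map (f := fun c : Char => c) (l := x) (acc := [])
  simpa using this

-- B's fold invariant: the emitted parts are the prefixes, each extended by the carried prefix
lemma uraiB_fold (l pre : List Char) (parts : List (List Char)) :
    l.foldl (fun (st : List Char × List (List Char)) ch =>
        let pre := st.1 ++ [ch]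
        (pre, st.2 ++ [pre])) (pre, parts)
    = (pre ++ l, parts ++ (List.range l.length).map (fun i => pre ++ l.take (i + 1))) := by
  induction l generalizing pre parts with
  | nil => simp
  | cons c cs ih =>
    rw [List.foldl_cons, ih]
    refine Prod.ext (by simp) ?_
    simp only [List.length_cons, List.range_succ_eq_map, List.map_cons, List.map_map]
    simp [Function.comp, List.append_assoc]

-- ===== VERDICT (by name: the statement is the Claim_ definition above) =====
theorem urai_spec : Claim_equal_urai := by
  intro kata _
  show urai kata = urai_alt kata
  rw [urai, urai_alt]
  simp only [uraiA_x, foldl_push_id, uraiB_fold]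
  simp
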